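-- pv_equiv track=rewrite | github.com/satani99/Face_comparison | face_detector.py | getting_face_co
-- ===== SOURCE A (Python) =====
-- def getting_face_co(list):
--     list_w = {}
--     for i in range(len(list)):
--         list_w[i] = list[i][-1]
--     max_w = max(list_w.values())
--     i = [key for key in list_w.keys()][[value for value in list_w.values()].index(max_w)]
--     x, y, w, h = list[i]
--     return x, y, w, h
-- ===== SOURCE B (Python) =====
-- def getting_face_co(list):
--     x, y, w, h = max(list, key=lambda e: e[-1])
--     return x, y, w, h
-- ===== Notes on version B (the rewrite author's own statement) =====
-- stated objective: simpler
-- what changed: Replaces the index dict, the separate max over its values and the .index() rescan with a single max(list, key=last-element) pass followed by tuple unpacking.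
import Mathlib
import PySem

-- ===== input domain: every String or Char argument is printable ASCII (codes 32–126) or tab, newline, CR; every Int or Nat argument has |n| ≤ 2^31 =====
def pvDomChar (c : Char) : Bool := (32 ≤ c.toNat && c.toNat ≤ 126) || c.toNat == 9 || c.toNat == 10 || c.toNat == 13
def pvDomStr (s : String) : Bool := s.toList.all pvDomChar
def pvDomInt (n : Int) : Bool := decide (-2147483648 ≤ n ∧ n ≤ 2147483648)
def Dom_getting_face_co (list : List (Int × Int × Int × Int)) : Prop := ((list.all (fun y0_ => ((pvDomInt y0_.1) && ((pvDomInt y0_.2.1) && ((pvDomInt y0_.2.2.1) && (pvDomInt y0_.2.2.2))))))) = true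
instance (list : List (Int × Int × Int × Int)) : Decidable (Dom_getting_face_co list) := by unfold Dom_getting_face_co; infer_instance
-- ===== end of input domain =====

-- B replaces A's index dict + max-over-values + .index() rescan with one max(key=last component) pass (simpler, same cost).


-- ===== PORT A =====
def getting_face_co (list : List (Int × Int × Int × Int)) : Int × Int × Int × Int :=
  -- list_w = {}; for i in range(len(list)): list_w[i] = list[i][-1]
  let list_w : PySem.Dict Int Int :=
    (PySem.List.pyRange 0 (list.length : Int) 1).foldl
      (fun d i => d.insert i (PySem.List.pyGetD list i (0, 0, 0, 0)).2.2.2) PySem.Dict.empty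
  -- max_w = max(list_w.values())  (ValueError on empty list: excluded by Pre_)
  match PySem.List.max? list_w.values (fun v => v) with
  | none => (0, 0, 0, 0)
  | some max_w =>
    -- i = [key for key in list_w.keys()][[value for value in list_w.values()].index(max_w)]
    match PySem.List.index? list_w.values max_w with
    | none => (0, 0, 0, 0)  -- unreachable: max_w is a member of the values
    | some j =>
      let i := PySem.List.pyGetD list_w.keys (j : Int) 0
      -- x, y, w, h = list[i]; return x, y, w, h
      let (x, y, w, h) := PySem.List.pyGetD list i (0, 0, 0, 0)
      (x, y, w, h)

-- ===== PORT B =====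
def getting_face_co_alt (list : List (Int × Int × Int × Int)) : Int × Int × Int × Int :=
  -- x, y, w, h = max(list, key=lambda e: e[-1]); return x, y, w, h
  match PySem.List.max? list (fun e => e.2.2.2) with
  | none => (0, 0, 0, 0)  -- max([]) raises ValueError: excluded by Pre_
  | some (x, y, w, h) => (x, y, w, h)

-- ===== PRECONDITION & SPEC =====
-- Pre_ excludes only the empty list, on which Python A (and B) raises ValueError from max().
def Pre_getting_face_co (list : List (Int × Int × Int × Int)) : Prop := list ≠ []
instance (list : List (Int × Int × Int × Int)) : Decidable (Pre_getting_face_co list) := by unfold Pre_getting_face_co; infer_instance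
def pvWitness_getting_face_co : (List (Int × Int × Int × Int)) := [(1, 2, 3, 4)]

def Spec_getting_face_co (list : List (Int × Int × Int × Int)) (out : Int × Int × Int × Int) : Prop := out = getting_face_co_alt list
instance (list : List (Int × Int × Int × Int)) (out : Int × Int × Int × Int) : Decidable (Spec_getting_face_co list out) := by unfold Spec_getting_face_co; infer_instance

-- ===== CLAIM (what is proved, stated in full; the proofs are below) =====
def Claim_equal_getting_face_co : Prop := ∀ (list : List (Int × Int × Int × Int)), Dom_getting_face_co list → Pre_getting_face_co list → Spec_getting_face_co list (getting_face_co list)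

-- ===== LEMMAS AND PROOFS =====

-- max? on a two-or-more list steps by one comparison.
theorem max?_cons_cons {T : Type} (f : T → Int) (m y : T) (t : List T) :
    PySem.List.max? (m :: y :: t) f =
      if f m < f y then PySem.List.max? (y :: t) f else PySem.List.max? (m :: t) f := by
  simp only [PySem.List.max?, List.foldl]
  split_ifs <;> rfl

-- Core invariant: max? over (m :: t) returns exactly the element sitting at the
-- first index of the mapped list where the running maximum is attained.
theorem max_loop {T : Type} (f : T → Int) :
    ∀ (t : List T) (m : T),
      ∃ (b : T) (j : Nat) (hj : j < (m :: t).length),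
        PySem.List.max? (m :: t) f = some b ∧
        PySem.List.index? ((m :: t).map f) (List.foldl max (f m) (t.map f)) = some j ∧
        (m :: t)[j] = b := by
  intro t
  induction t with
  | nil =>
    intro m
    exact ⟨m, 0, by simp, by simp [PySem.List.max?, List.foldl],
      by simp, by simp⟩
  | cons y t' ih =>
    intro m
    by_cases h : f m < f y
    · obtain ⟨b, j, hj, hmax, hidx, helt⟩ := ih y
      have hMge : f y ≤ List.foldl max (f y) (t'.map f) := (PySem.List.le_foldl_max _ _).1
      have hne : f m ≠ List.foldl max (f y) (t'.map f) := by omega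
      refine ⟨b, j + 1, by simpa using Nat.succ_lt_succ hj, ?_, ?_, by simpa using helt⟩
      · rw [max?_cons_cons]; simp [h, hmax]
      · have : List.foldl max (f m) ((y :: t').map f) = List.foldl max (f y) (t'.map f) := by
          simp [max_eq_right (le_of_lt h)]
        rw [List.map_cons, this, PySem.List.index?_cons_of_ne _ hne, hidx]
        rfl
    · obtain ⟨b, j, hj, hmax, hidx, helt⟩ := ih m
      have hyx : f y ≤ f m := not_lt.mp h
      have hMeq : List.foldl max (f m) ((y :: t').map f) = List.foldl max (f m) (t'.map f) := by
        simp [max_eq_left hyx]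
      have hmaxfull : PySem.List.max? (m :: y :: t') f = some b := by
        rw [max?_cons_cons]; simp [h, hmax]
      cases j with
      | zero =>
        have h0 : f m = List.foldl max (f m) (t'.map f) := by
          obtain ⟨hk, hv, _⟩ := PySem.List.getElem_of_index?_eq_some hidx
          simpa using hv
        refine ⟨b, 0, by simp, hmaxfull, ?_, by simpa using helt⟩
        rw [List.map_cons, hMeq, ← h0]
        simpa using PySem.List.index?_cons_self (f m) ((y :: t').map f)
      | succ j' =>
        have hmne : f m ≠ List.foldl max (f m) (t'.map f) := by
          intro hcontra
          rw [List.map_cons, ← hcontra] at hidx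
          rw [PySem.List.index?_cons_self] at hidx
          exact Nat.succ_ne_zero j' (Option.some.injEq _ _ ▸ hidx.symm ▸ rfl)
        have hmle : f m ≤ List.foldl max (f m) (t'.map f) := (PySem.List.le_foldl_max _ _).1
        have hyne : f y ≠ List.foldl max (f m) (t'.map f) :=
          ne_of_lt (lt_of_le_of_lt hyx (lt_of_le_of_ne hmle hmne))
        have hidx' : PySem.List.index? (t'.map f) (List.foldl max (f m) (t'.map f)) = some j' := by
          rw [List.map_cons, PySem.List.index?_cons_of_ne _ hmne] at hidx
          cases hcase : PySem.List.index? (t'.map f) (List.foldl max (f m) (t'.map f)) with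
          | none => rw [hcase] at hidx; simp at hidx
          | some k => rw [hcase] at hidx; simp at hidx; simp [hidx]
        refine ⟨b, j' + 2, ?_, hmaxfull, ?_, ?_⟩
        · simp only [List.length_cons]
          simp only [List.length_cons] at hj; omega
        · rw [List.map_cons, hMeq, PySem.List.index?_cons_of_ne _ hmne,
            List.map_cons, PySem.List.index?_cons_of_ne _ hyne, hidx']
          rfl
        · have : (m :: t')[j' + 1] = t'[j']'(by simpa using hj) := by simp
          rw [this] at helt
          simpa using helt

-- A's dict-building loop over range(len(list)) appends fresh keys 0..n-1 in order.
theorem list_w_items (l : List (Int × Int × Int × Int)) :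
    ((PySem.List.pyRange 0 (l.length : Int) 1).foldl
      (fun d i => d.insert i (PySem.List.pyGetD l i (0, 0, 0, 0)).2.2.2) PySem.Dict.empty).items =
    (PySem.List.pyRange 0 (l.length : Int) 1).map
      (fun i => (i, (PySem.List.pyGetD l i (0, 0, 0, 0)).2.2.2)) := by
  have := PySem.Dict.items_foldl_insert_fresh (l := PySem.List.pyRange 0 (l.length : Int) 1)
    (k := fun i => i) (v := fun i => (PySem.List.pyGetD l i (0, 0, 0, 0)).2.2.2)
    (d := PySem.Dict.empty)
    (by intro a _; simp [PySem.Dict.contains_empty])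
    (by simpa using PySem.List.nodup_pyRange_one 0 (l.length : Int))
  simpa using this

-- ===== VERDICT (by name: the statement is the Claim_ definition above) =====
theorem getting_face_co_spec : Claim_equal_getting_face_co := by
  intro l _ hpre
  unfold Spec_getting_face_co
  cases l with
  | nil => exact absurd rfl hpre
  | cons x t =>
    obtain ⟨b, j, hj, hBmax, hidx, helt⟩ := max_loop (fun e : Int × Int × Int × Int => e.2.2.2) t x
    have hvals : ((PySem.List.pyRange 0 ((x :: t).length : Int) 1).foldl
        (fun d i => d.insert i (PySem.List.pyGetD (x :: t) i (0, 0, 0, 0)).2.2.2) PySem.Dict.empty).values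
        = (x :: t).map (fun e => e.2.2.2) := by
      simp only [PySem.Dict.values, list_w_items, List.map_map]
      have h1 := congrArg (List.map (fun e : Int × Int × Int × Int => e.2.2.2))
        (PySem.List.map_pyGetD_pyRange_zero' (x :: t) ((0, 0, 0, 0) : Int × Int × Int × Int))
      rw [List.map_map] at h1
      exact h1
    have hkeys : ((PySem.List.pyRange 0 ((x :: t).length : Int) 1).foldl
        (fun d i => d.insert i (PySem.List.pyGetD (x :: t) i (0, 0, 0, 0)).2.2.2) PySem.Dict.empty).keys
        = PySem.List.pyRange 0 ((x :: t).length : Int) 1 := by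
      simp only [PySem.Dict.keys, list_w_items, List.map_map]
      exact List.map_id _
    have hB : getting_face_co_alt (x :: t) = b := by
      unfold getting_face_co_alt
      rw [hBmax]
    have hmaxeq : PySem.List.max? ((x :: t).map (fun e : Int × Int × Int × Int => e.2.2.2)) (fun v => v)
        = some (List.foldl max ((fun e : Int × Int × Int × Int => e.2.2.2) x)
            (t.map (fun e : Int × Int × Int × Int => e.2.2.2))) := by
      rw [List.map_cons]
      exact PySem.List.max?_id_cons _ _
    have hkey : PySem.List.pyGetD (PySem.List.pyRange 0 (((x :: t).length : Int)) 1) ((j : Int)) 0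
        = (j : Int) := by
      rw [PySem.List.pyGetD_natCast]
      rw [List.getD_eq_getElem _ _ (by rw [PySem.List.length_pyRange_one]; simpa using hj)]
      rw [PySem.List.getElem_pyRange_one]
      simp
    have hA : getting_face_co (x :: t) = b := by
      unfold getting_face_co
      simp only [hvals, hkeys, hmaxeq, hidx, hkey, PySem.List.pyGetD_natCast]
      rw [List.getD_eq_getElem _ _ hj, helt]
    rw [hA, hB]
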